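-- pv_equiv track=rewrite | github.com/Kongchengfung/Kongchengfung | AI_Assignment_2/iengine.py | tt_check_all_count_and_total
-- ===== SOURCE A (Python) =====
-- def tt_check_all_count_and_total(kb, query, symbols, model):
--     if not symbols:
--         if pl_true(kb, model):
--             if pl_true([query], model):
--                 return 1, 1
--             else:
--                 return 0, 1
--         return 0, 0
--     else:
--         P = symbols[0]
--         rest = symbols[1:]
--         model_true = model.copy()
--         model_false = model.copy()
--         model_true[P] = True
--         model_false[P] = False
--
--         yes1, total1 = tt_check_all_count_and_total(kb, query, rest, model_true)
--         yes2, total2 = tt_check_all_count_and_total(kb, query, rest, model_false)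
--         return yes1 + yes2, total1 + total2
--
-- def pl_true(clauses, model):
--     for clause in clauses:
--         if "=>" in clause:
--             premises, conclusion = map(str.strip, clause.split("=>"))
--             premise_list = [p.strip() for p in premises.split("&")]
--             # If all premises are true, then conclusion must be true
--             if all(model.get(p, False) for p in premise_list):
--                 if not model.get(conclusion, False):
--                     return False
--         else:
--             # Atomic fact must be true
--             if not model.get(clause.strip(), False):
--                 return False
--     return True
-- ===== SOURCE B (Python) =====
-- def tt_check_all_count_and_total(kb, query, symbols, model):
--     # iterative enumeration of all assignments instead of binary recursion
--     combos = [[]]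
--     for _ in symbols:
--         combos = [[True] + c for c in combos] + [[False] + c for c in combos]
--     yes = 0
--     total = 0
--     for combo in combos:
--         m = model.copy()
--         for sym, val in zip(symbols, combo):
--             m[sym] = val
--         if pl_true(kb, m):
--             total += 1
--             if pl_true([query], m):
--                 yes += 1
--     return yes, total
--
-- def pl_true(clauses, model):
--     for clause in clauses:
--         if "=>" in clause:
--             premises, conclusion = map(str.strip, clause.split("=>"))
--             premise_list = [p.strip() for p in premises.split("&")]
--             if all(model.get(p, False) for p in premise_list):
--                 if not model.get(conclusion, False):
--                     return False
--         else:
--             if not model.get(clause.strip(), False):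
--                 return False
--     return True
-- ===== Notes on version B (the rewrite author's own statement) =====
-- stated objective: alternative
-- what changed: Replaces A's binary recursion over symbols with an iterative enumeration: a loop builds the list of all True/False combinations, then a single pass builds each model by updating a copy and counts the satisfying ones.
-- outside the precondition, e.g. on tt_check_all_count_and_total(['x', 'a=>b=>c'], 'x', [], {}): A returns (0, 0), B returns (0, 0)
import Mathlib
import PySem

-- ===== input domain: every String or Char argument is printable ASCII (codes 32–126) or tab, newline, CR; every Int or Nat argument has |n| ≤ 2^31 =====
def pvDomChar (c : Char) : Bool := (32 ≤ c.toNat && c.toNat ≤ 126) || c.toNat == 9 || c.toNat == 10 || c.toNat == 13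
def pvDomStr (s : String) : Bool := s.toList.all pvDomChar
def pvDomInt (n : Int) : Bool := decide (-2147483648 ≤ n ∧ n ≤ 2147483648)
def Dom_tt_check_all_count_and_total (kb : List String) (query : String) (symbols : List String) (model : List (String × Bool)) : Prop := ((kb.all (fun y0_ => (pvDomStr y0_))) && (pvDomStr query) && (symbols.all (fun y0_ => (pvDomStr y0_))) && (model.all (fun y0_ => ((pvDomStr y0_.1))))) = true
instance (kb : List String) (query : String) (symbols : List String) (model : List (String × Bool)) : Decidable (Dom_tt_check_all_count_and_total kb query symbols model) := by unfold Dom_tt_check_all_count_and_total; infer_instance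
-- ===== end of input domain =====

-- B replaces A's binary recursion over symbols by an iterative enumeration (build all True/False
-- combinations with a loop, then one counting pass); objective: alternative decomposition, same cost.

-- ===== PORT A =====
-- shared helper pl_true, identical in Source A and Source B; the `| _ => false` arm is the
-- ValueError of `premises, conclusion = ...` when split yields ≠ 2 parts (excluded by Pre_)
def plTrue (clauses : List String) (model : PySem.Dict String Bool) : Bool :=
  match clauses with
  | [] => true
  | clause :: rest =>
    if PySem.Str.isIn "=>" clause then
      match PySem.Str.split? clause "=>" with
      | some [premises0, conclusion0] =>
        let premises := PySem.Str.strip premises0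
        let conclusion := PySem.Str.strip conclusion0
        let premise_list := ((PySem.Str.split? premises "&").getD []).map PySem.Str.strip
        if premise_list.all (fun p => model.getD p false) then
          if !(model.getD conclusion false) then false else plTrue rest model
        else plTrue rest model
      | _ => false
    else
      if !(model.getD (PySem.Str.strip clause) false) then false else plTrue rest model

-- A's recursion, on the model as a PySem.Dict
def ttGoA (kb : List String) (query : String) (symbols : List String) (model : PySem.Dict String Bool) : Int × Int :=
  match symbols with
  | [] =>
    if plTrue kb model then
      if plTrue [query] model then (1, 1) else (0, 1)
    else (0, 0)
  | P :: rest =>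
    let model_true := model.insert P true
    let model_false := model.insert P false
    let r1 := ttGoA kb query rest model_true
    let r2 := ttGoA kb query rest model_false
    (r1.1 + r2.1, r1.2 + r2.2)

def tt_check_all_count_and_total (kb : List String) (query : String) (symbols : List String) (model : List (String × Bool)) : Int × Int :=
  ttGoA kb query symbols (PySem.Dict.mk model)

-- ===== PORT B =====
def tt_check_all_count_and_total_alt (kb : List String) (query : String) (symbols : List String) (model : List (String × Bool)) : Int × Int :=
  let combos := symbols.foldl (fun acc _ => acc.map (fun c => true :: c) ++ acc.map (fun c => false :: c)) [[]]
  combos.foldl (fun yt combo =>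
    let m := (symbols.zip combo).foldl (fun d sv => d.insert sv.1 sv.2) (PySem.Dict.mk model)
    if plTrue kb m then
      let total := yt.2 + 1
      if plTrue [query] m then (yt.1 + 1, total) else (yt.1, total)
    else yt) ((0 : Int), (0 : Int))

-- ===== PRECONDITION & SPEC =====
-- Pre_ excludes inputs where some clause of kb (or the query) contains "=>" more than once: there
-- the 2-way unpacking of clause.split("=>") raises ValueError whenever evaluation reaches that
-- clause (on some such inputs pl_true short-circuits first and A still returns; those are excluded too).
def Pre_tt_check_all_count_and_total (kb : List String) (query : String) (symbols : List String) (model : List (String × Bool)) : Prop :=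
  ∀ c ∈ kb ++ [query], PySem.Str.count c "=>" ≤ 1
instance (kb : List String) (query : String) (symbols : List String) (model : List (String × Bool)) : Decidable (Pre_tt_check_all_count_and_total kb query symbols model) := by unfold Pre_tt_check_all_count_and_total; infer_instance

def pvWitness_tt_check_all_count_and_total : List String × String × List String × (List (String × Bool)) :=
  (["a", "a => b"], "b", ["a", "b"], [])

def Spec_tt_check_all_count_and_total (kb : List String) (query : String) (symbols : List String) (model : List (String × Bool)) (out : Int × Int) : Prop := out = tt_check_all_count_and_total_alt kb query symbols model
instance (kb : List String) (query : String) (symbols : List String) (model : List (String × Bool)) (out : Int × Int) : Decidable (Spec_tt_check_all_count_and_total kb query symbols model out) := by unfold Spec_tt_check_all_count_and_total; infer_instance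

-- ===== CLAIM (what is proved, stated in full; the proofs are below) =====
def Claim_equal_tt_check_all_count_and_total : Prop := ∀ (kb : List String) (query : String) (symbols : List String) (model : List (String × Bool)), Dom_tt_check_all_count_and_total kb query symbols model → Pre_tt_check_all_count_and_total kb query symbols model → Spec_tt_check_all_count_and_total kb query symbols model (tt_check_all_count_and_total kb query symbols model)

-- ===== LEMMAS AND PROOFS =====

-- a fold with a constant step function commutes with one application of the step
lemma foldl_const_comm {α β : Type} (g : β → β) (l : List α) :
    ∀ init : β, List.foldl (fun acc _ => g acc) (g init) l = g (List.foldl (fun acc _ => g acc) init l) := by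
  induction l with
  | nil => intro init; rfl
  | cons x xs ih => intro init; exact ih (g init)

-- B's counting fold over the enumerated combinations equals acc + A's recursion, componentwise
lemma count_fold_eq (kb : List String) (query : String) :
    ∀ (symbols : List String) (d : PySem.Dict String Bool) (acc : Int × Int),
      (List.foldl (fun acc _ => List.map (fun c => true :: c) acc ++ List.map (fun c => false :: c) acc) [([] : List Bool)] symbols).foldl
        (fun yt combo =>
          let m := (symbols.zip combo).foldl (fun d sv => d.insert sv.1 sv.2) d
          if plTrue kb m then
            let total := yt.2 + 1
            if plTrue [query] m then (yt.1 + 1, total) else (yt.1, total)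
          else yt) acc
      = (acc.1 + (ttGoA kb query symbols d).1, acc.2 + (ttGoA kb query symbols d).2) := by
  intro symbols
  induction symbols with
  | nil =>
    intro d acc
    simp only [List.foldl, List.zip, List.zipWith_nil_left, List.foldl_nil, ttGoA]
    split_ifs <;> simp
  | cons P rest ih =>
    intro d acc
    rw [show (List.foldl (fun acc _ => List.map (fun c => true :: c) acc ++ List.map (fun c => false :: c) acc) [([] : List Bool)] (P :: rest))
        = List.map (fun c => true :: c) (List.foldl (fun acc _ => List.map (fun c => true :: c) acc ++ List.map (fun c => false :: c) acc) [([] : List Bool)] rest)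
          ++ List.map (fun c => false :: c) (List.foldl (fun acc _ => List.map (fun c => true :: c) acc ++ List.map (fun c => false :: c) acc) [([] : List Bool)] rest)
        from foldl_const_comm _ rest [([] : List Bool)]]
    rw [List.foldl_append, List.foldl_map, List.foldl_map]
    have hbody : ∀ (b : Bool) (yt : Int × Int) (c : List Bool),
        (fun yt combo =>
          let m := ((P :: rest).zip combo).foldl (fun d sv => d.insert sv.1 sv.2) d
          if plTrue kb m then
            let total := yt.2 + 1
            if plTrue [query] m then (yt.1 + 1, total) else (yt.1, total)
          else yt) yt (b :: c)
        = (fun yt combo =>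
          let m := (rest.zip combo).foldl (fun d sv => d.insert sv.1 sv.2) (d.insert P b)
          if plTrue kb m then
            let total := yt.2 + 1
            if plTrue [query] m then (yt.1 + 1, total) else (yt.1, total)
          else yt) yt c := by
      intro b yt c; rfl
    simp only [hbody]
    rw [ih (d.insert P true) acc, ih (d.insert P false) _]
    simp only [ttGoA]
    simp [add_assoc]

-- ===== VERDICT (by name: the statement is the Claim_ definition above) =====
theorem tt_check_all_count_and_total_spec : Claim_equal_tt_check_all_count_and_total := by
  intro kb query symbols model _ _
  unfold Spec_tt_check_all_count_and_total tt_check_all_count_and_total tt_check_all_count_and_total_alt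
  rw [count_fold_eq kb query symbols (PySem.Dict.mk model) ((0 : Int), (0 : Int))]
  simp
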